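-- pv_equiv track=rewrite | github.com/KevsterAmp/advent-of-code | day-07/main.py | get_rankings
-- ===== SOURCE A (Python) =====
-- def get_rankings(lines):
--     ranking = []
--     # find equal strength and sort em
--     # find all 5
--     all_ranks = []
--     for i in range(1, 8):
--         rank = [x for x in lines if x[0] == i]
--         all_ranks.append(rank)
--
--     for rank in all_ranks:
--         rank.sort(reverse=True, key=get_elem)
--         ranking += rank
--
--     return ranking
--
-- def get_elem(line):
--     return line[1]
-- ===== SOURCE B (Python) =====
-- def get_rankings(lines):
--     filtered = [x for x in lines if x[0] in {1, 2, 3, 4, 5, 6, 7}]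
--     by_strength = sorted(filtered, key=lambda x: x[1], reverse=True)
--     return sorted(by_strength, key=lambda x: x[0])
-- ===== Notes on version B (the rewrite author's own statement) =====
-- stated objective: simpler
-- what changed: Replaces the seven bucket-building passes over the input plus a per-bucket sort with one membership filter followed by a single composite stable ordering (stable sort descending by the second component, then stable sort ascending by the first).
import Mathlib
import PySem

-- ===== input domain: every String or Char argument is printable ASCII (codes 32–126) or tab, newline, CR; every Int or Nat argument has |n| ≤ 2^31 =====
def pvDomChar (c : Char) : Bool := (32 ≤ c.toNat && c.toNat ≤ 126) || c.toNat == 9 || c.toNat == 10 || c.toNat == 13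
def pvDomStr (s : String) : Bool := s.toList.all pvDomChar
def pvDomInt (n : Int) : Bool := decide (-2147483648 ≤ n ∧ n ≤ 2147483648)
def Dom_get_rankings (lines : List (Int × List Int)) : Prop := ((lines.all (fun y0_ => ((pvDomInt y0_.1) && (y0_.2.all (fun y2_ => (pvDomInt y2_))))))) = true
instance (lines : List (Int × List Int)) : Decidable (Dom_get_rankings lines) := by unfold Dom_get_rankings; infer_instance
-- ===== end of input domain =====

-- B replaces A's seven bucket passes + per-bucket sorts with one filter and a two-pass stable composite sort; same return value, no speed claim.

-- ===== PORT A =====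
def get_elem (line : Int × List Int) : List Int := line.2

def get_rankings (lines : List (Int × List Int)) : List (Int × List Int) :=
  -- all_ranks: for i in range(1, 8): rank = [x for x in lines if x[0] == i]; all_ranks.append(rank)
  let all_ranks : List (List (Int × List Int)) :=
    (PySem.List.pyRange 1 8 1).foldl
      (fun acc i => acc ++ [lines.filter (fun x => x.1 == i)]) []
  -- for rank in all_ranks: rank.sort(reverse=True, key=get_elem); ranking += rank
  all_ranks.foldl (fun ranking rank => ranking ++ PySem.List.sorted rank get_elem true) []

-- ===== PORT B =====
def get_rankings_alt (lines : List (Int × List Int)) : List (Int × List Int) :=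
  let filtered := lines.filter (fun x => PySem.Set.contains (PySem.Set.ofList [1, 2, 3, 4, 5, 6, 7]) x.1)
  let by_strength := PySem.List.sorted filtered (fun x => x.2) true
  PySem.List.sorted by_strength (fun x => x.1) false

-- ===== PRECONDITION & SPEC =====
def Spec_get_rankings (lines : List (Int × List Int)) (out : List (Int × List Int)) : Prop := out = get_rankings_alt lines
instance (lines : List (Int × List Int)) (out : List (Int × List Int)) : Decidable (Spec_get_rankings lines out) := by unfold Spec_get_rankings; infer_instance

-- ===== CLAIM (what is proved, stated in full; the proofs are below) =====
def Claim_equal_get_rankings : Prop := ∀ (lines : List (Int × List Int)), Dom_get_rankings lines → Spec_get_rankings lines (get_rankings lines)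

-- ===== LEMMAS AND PROOFS =====

-- insertBy skips a prefix none of whose elements x goes before
theorem pv_insertBy_skip {α : Type} (before : α → α → Bool) (x : α) (P Q : List α)
    (hP : ∀ y ∈ P, before x y = false) :
    PySem.List.insertBy before x (P ++ Q) = P ++ PySem.List.insertBy before x Q := by
  induction P with
  | nil => simp
  | cons y P ih =>
    simp only [List.cons_append, PySem.List.insertBy, hP y (by simp)]
    simp only [Bool.false_eq_true, if_false, List.cons.injEq, true_and]
    exact ih (fun z hz => hP z (by simp [hz]))

-- insertBy puts x in front when x goes before every element
theorem pv_insertBy_front {α : Type} (before : α → α → Bool) (x : α) (Q : List α)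
    (hQ : ∀ y ∈ Q, before x y = true) :
    PySem.List.insertBy before x Q = x :: Q := by
  cases Q with
  | nil => rfl
  | cons y Q => simp [PySem.List.insertBy, hQ y (by simp)]

-- inserting x into a key-ascending concatenation of buckets appends x to its own bucket
theorem pv_insertBy_bucketed (g : Int → List (Int × List Int)) (ks : List Int)
    (x : Int × List Int) (hx : x.1 ∈ ks) (hks : ks.Pairwise (· < ·))
    (hg : ∀ i, ∀ y ∈ g i, y.1 = i) :
    PySem.List.insertBy (fun a b => decide (a.1 < b.1)) x (ks.flatMap g) =
      ks.flatMap (fun i => if i = x.1 then g i ++ [x] else g i) := by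
  induction ks with
  | nil => cases hx
  | cons k ks ih =>
    have hgt : ∀ i ∈ ks, k < i := (List.pairwise_cons.mp hks).1
    simp only [List.flatMap_cons]
    by_cases hk : k = x.1
    · rw [pv_insertBy_skip _ _ _ _ (fun y hy => by
        have h1 := hg k y hy; simp [h1, hk])]
      rw [pv_insertBy_front _ _ _ (fun y hy => by
        obtain ⟨i, hi, hyi⟩ := List.mem_flatMap.mp hy
        have h1 := hg i y hyi
        have h2 := hgt i hi
        simp only [decide_eq_true_eq, h1]
        omega)]
      have hcong : (ks.flatMap fun i => if i = x.1 then g i ++ [x] else g i) = ks.flatMap g := by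
        refine List.flatMap_congr (fun i hi => ?_)
        have := hgt i hi
        rw [if_neg (by omega)]
      rw [hcong, if_pos hk]
      simp
    · have hx' : x.1 ∈ ks := by
        cases List.mem_cons.mp hx with
        | inl h => exact absurd h.symm hk
        | inr h => exact h
      rw [pv_insertBy_skip _ _ _ _ (fun y hy => by
        have h1 := hg k y hy
        have h2 := hgt x.1 hx'
        simp only [h1, decide_eq_false_iff_not]
        omega)]
      rw [ih hx' (List.pairwise_cons.mp hks).2, if_neg hk]

-- the stable ascending sort by the first component of a list whose first components all lie in ks
-- is the concatenation, over ks in order, of the subsequences with that first component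
theorem pv_sorted_fst_eq_flatMap_aux (ks : List Int) (hks : ks.Pairwise (· < ·))
    (M proc : List (Int × List Int)) (hM : ∀ y ∈ M, y.1 ∈ ks) :
    M.foldl (fun acc x => PySem.List.insertBy (fun a b => decide (a.1 < b.1)) x acc)
        (ks.flatMap (fun i => proc.filter (fun y => y.1 == i))) =
      ks.flatMap (fun i => (proc ++ M).filter (fun y => y.1 == i)) := by
  induction M generalizing proc with
  | nil => simp
  | cons x M ih =>
    simp only [List.foldl_cons]
    rw [pv_insertBy_bucketed _ ks x (hM x (by simp)) hks
        (fun i y hy => by simpa using (List.mem_filter.mp hy).2)]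
    have hstep : (ks.flatMap fun i =>
        if i = x.1 then proc.filter (fun y => y.1 == i) ++ [x] else proc.filter (fun y => y.1 == i)) =
        ks.flatMap (fun i => (proc ++ [x]).filter (fun y => y.1 == i)) := by
      refine List.flatMap_congr (fun i _ => ?_)
      rw [List.filter_append]
      by_cases h : i = x.1
      · subst h; simp
      · have hxi : ((x.1 == i) = false) := beq_eq_false_iff_ne.mpr (fun hh => h hh.symm)
        simp [hxi, h]
    rw [hstep, ih (proc ++ [x]) (fun y hy => hM y (by simp [hy]))]
    simp
theorem pv_sorted_fst_eq_flatMap (ks : List Int) (hks : ks.Pairwise (· < ·))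
    (M : List (Int × List Int)) (hM : ∀ y ∈ M, y.1 ∈ ks) :
    PySem.List.sorted M (fun x => x.1) false =
      ks.flatMap (fun i => M.filter (fun y => y.1 == i)) := by
  rw [PySem.List.sorted_eq_foldl_insertBy]
  have h := pv_sorted_fst_eq_flatMap_aux ks hks M [] hM
  rw [List.nil_append] at h
  have h0 : ks.flatMap (fun i => List.filter (fun y => y.1 == i) ([] : List (Int × List Int))) = [] := by
    simp
  rw [h0] at h
  exact h

-- the reverse insertion step keeps the accumulator key-descending
theorem pv_insertBy_rev_pairwise (key : (Int × List Int) → List Int) (x : Int × List Int)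
    (acc : List (Int × List Int)) (hacc : acc.Pairwise (fun a b => key b ≤ key a)) :
    (PySem.List.insertBy (fun a b => decide (key b < key a)) x acc).Pairwise
      (fun a b => key b ≤ key a) := by
  induction acc with
  | nil => simp [PySem.List.insertBy]
  | cons y acc ih =>
    obtain ⟨hy, hacc'⟩ := List.pairwise_cons.mp hacc
    by_cases h : key y < key x
    · simp only [PySem.List.insertBy, decide_eq_true_eq, if_pos h]
      refine List.pairwise_cons.mpr ⟨?_, hacc⟩
      intro z hz
      cases List.mem_cons.mp hz with
      | inl hzy => subst hzy; exact le_of_lt h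
      | inr hzz => exact le_trans (hy z hzz) (le_of_lt h)
    · simp only [PySem.List.insertBy, decide_eq_true_eq, if_neg h]
      refine List.pairwise_cons.mpr ⟨?_, ih hacc'⟩
      intro z hz
      cases (PySem.List.mem_insertBy _ _ _ _).mp hz with
      | inl hzx => subst hzx; exact le_of_not_gt h
      | inr hzz => exact hy z hzz

-- filtering commutes with one reverse-insertion into a key-descending accumulator
theorem pv_filter_insertBy_rev (key : (Int × List Int) → List Int) (p : (Int × List Int) → Bool)
    (x : Int × List Int) (acc : List (Int × List Int))
    (hacc : acc.Pairwise (fun a b => key b ≤ key a)) :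
    (PySem.List.insertBy (fun a b => decide (key b < key a)) x acc).filter p =
      if p x then PySem.List.insertBy (fun a b => decide (key b < key a)) x (acc.filter p)
      else acc.filter p := by
  induction acc with
  | nil => by_cases h : p x <;> simp [PySem.List.insertBy, h]
  | cons y acc ih =>
    obtain ⟨hy, hacc'⟩ := List.pairwise_cons.mp hacc
    by_cases h : key y < key x
    · simp only [PySem.List.insertBy, decide_eq_true_eq, if_pos h]
      by_cases hx : p x
      · rw [if_pos hx]
        have hfront : PySem.List.insertBy (fun a b => decide (key b < key a)) x ((y :: acc).filter p)
            = x :: (y :: acc).filter p := by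
          refine pv_insertBy_front _ _ _ (fun z hz => ?_)
          have hzmem : z ∈ y :: acc := List.mem_of_mem_filter hz
          have : key z ≤ key y := by
            cases List.mem_cons.mp hzmem with
            | inl hzy => subst hzy; exact le_refl _
            | inr hzz => exact hy z hzz
          simp [lt_of_le_of_lt this h]
        rw [hfront, List.filter_cons_of_pos hx]
      · rw [if_neg hx, List.filter_cons_of_neg hx]
    · simp only [PySem.List.insertBy, decide_eq_true_eq, if_neg h]
      by_cases hpy : p y
      · rw [List.filter_cons_of_pos hpy, List.filter_cons_of_pos hpy, ih hacc']
        by_cases hx : p x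
        · rw [if_pos hx, if_pos hx]
          simp [PySem.List.insertBy, h]
        · rw [if_neg hx, if_neg hx]
      · rw [List.filter_cons_of_neg hpy, List.filter_cons_of_neg hpy, ih hacc']

-- filtering commutes with the stable descending sort (fold form)
theorem pv_filter_sorted_rev_aux (key : (Int × List Int) → List Int)
    (p : (Int × List Int) → Bool) (xs acc : List (Int × List Int))
    (hacc : acc.Pairwise (fun a b => key b ≤ key a)) :
    (xs.foldl (fun acc x => PySem.List.insertBy (fun a b => decide (key b < key a)) x acc) acc).filter p =
      (xs.filter p).foldl (fun acc x => PySem.List.insertBy (fun a b => decide (key b < key a)) x acc)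
        (acc.filter p) := by
  induction xs generalizing acc with
  | nil => simp
  | cons x xs ih =>
    simp only [List.foldl_cons]
    rw [ih _ (pv_insertBy_rev_pairwise key x acc hacc),
        pv_filter_insertBy_rev key p x acc hacc]
    by_cases hx : p x
    · rw [if_pos hx, List.filter_cons_of_pos hx, List.foldl_cons]
    · rw [if_neg hx, List.filter_cons_of_neg hx]

-- sorted(…, reverse=True) commutes with filter (stability)
theorem pv_filter_sorted_rev (key : (Int × List Int) → List Int)
    (p : (Int × List Int) → Bool) (xs : List (Int × List Int)) :
    (PySem.List.sorted xs key true).filter p = PySem.List.sorted (xs.filter p) key true := by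
  rw [PySem.List.sorted_rev_eq_foldl_insertBy, PySem.List.sorted_rev_eq_foldl_insertBy]
  simpa using pv_filter_sorted_rev_aux key p xs [] (by simp)

-- ===== VERDICT (by name: the statement is the Claim_ definition above) =====
theorem get_rankings_spec : Claim_equal_get_rankings := by
  intro lines _
  unfold Spec_get_rankings get_rankings get_rankings_alt
  have hks : (PySem.List.pyRange 1 8 1) = [1, 2, 3, 4, 5, 6, 7] := by decide
  rw [hks]
  rw [PySem.List.foldl_append_singleton_eq_map, List.nil_append,
      PySem.List.foldl_append_eq_flatMap, List.nil_append, List.flatMap_map]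
  set filtered := lines.filter (fun x => PySem.Set.contains (PySem.Set.ofList [1, 2, 3, 4, 5, 6, 7]) x.1) with hfiltered
  have hmem : ∀ y : Int × List Int, y ∈ filtered → y.1 ∈ ([1, 2, 3, 4, 5, 6, 7] : List Int) := by
    intro y hy
    have hc := (List.mem_filter.mp hy).2
    simpa [PySem.Set.contains, PySem.Set.ofList] using hc
  have hM : ∀ y ∈ PySem.List.sorted filtered (fun x => x.2) true, y.1 ∈ ([1, 2, 3, 4, 5, 6, 7] : List Int) :=
    fun y hy => hmem y ((PySem.List.mem_sorted _ _ _ _).mp hy)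
  rw [pv_sorted_fst_eq_flatMap [1, 2, 3, 4, 5, 6, 7] (by decide) _ hM]
  refine List.flatMap_congr (fun i hi => ?_)
  rw [pv_filter_sorted_rev]
  congr 1
  rw [hfiltered, List.filter_filter]
  refine List.filter_congr (fun x _ => ?_)
  by_cases h : x.1 = i
  · simp [h]
    simpa using hi
  · have hxi : ((x.1 == i) = false) := beq_eq_false_iff_ne.mpr h
    simp [hxi]
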